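-- pv_equiv track=rewrite | github.com/tiwaritanay01/ocr_Scanned_pdf_extract-text-and-smtp | preprocess.py | clean_numeric
-- ===== SOURCE A (Python) =====
-- def clean_numeric(text):
--
--     replacements = {
--         'O': '0',
--         'I': '1',
--         'l': '1',
--         'S': '5',
--         'B': '8'
--     }
--
--     for k, v in replacements.items():
--         text = text.replace(k, v)
--
--     return text
-- ===== SOURCE B (Python) =====
-- def clean_numeric(text):
--     mapping = {'O': '0', 'I': '1', 'l': '1', 'S': '5', 'B': '8'}
--     return ''.join(mapping.get(c, c) for c in text)
-- ===== Notes on version B (the rewrite author's own statement) =====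
-- stated objective: simpler
-- what changed: Replaces five full-string .replace passes (one per dict entry) by a single pass over the characters that looks each character up in the substitution map and joins the results.
import Mathlib
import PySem

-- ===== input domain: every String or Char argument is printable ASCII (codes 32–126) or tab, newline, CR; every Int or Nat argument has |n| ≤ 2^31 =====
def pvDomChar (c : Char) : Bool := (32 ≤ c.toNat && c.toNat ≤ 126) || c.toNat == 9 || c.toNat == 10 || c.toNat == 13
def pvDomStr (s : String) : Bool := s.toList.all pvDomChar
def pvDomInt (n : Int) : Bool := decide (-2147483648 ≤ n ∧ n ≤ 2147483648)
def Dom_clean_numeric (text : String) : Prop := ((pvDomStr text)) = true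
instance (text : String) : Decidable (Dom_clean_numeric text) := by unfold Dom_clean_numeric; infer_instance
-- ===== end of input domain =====

-- B replaces A's five full-string replace passes by one single pass with a per-character map lookup (objective: simpler).

-- ===== PORT A =====
-- A: build the dict, then for each (k, v) in its items do text = text.replace(k, v).
def clean_numeric (text : String) : String :=
  let replacements : PySem.Dict String String :=
    PySem.Dict.mk [("O", "0"), ("I", "1"), ("l", "1"), ("S", "5"), ("B", "8")]
  replacements.items.foldl (fun t kv => PySem.Str.replace t kv.1 kv.2) text

-- ===== PORT B =====
-- B: the substitution map over characters, built once.
def pvSubMap : PySem.Dict Char Char :=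
  PySem.Dict.mk [('O', '0'), ('I', '1'), ('l', '1'), ('S', '5'), ('B', '8')]

-- B: ''.join(mapping.get(c, c) for c in text) — one pass over the characters.
def clean_numeric_alt (text : String) : String :=
  String.ofList (text.toList.map (fun c => pvSubMap.getD c c))

-- ===== PRECONDITION & SPEC =====
def Spec_clean_numeric (text : String) (out : String) : Prop := out = clean_numeric_alt text
instance (text : String) (out : String) : Decidable (Spec_clean_numeric text out) := by unfold Spec_clean_numeric; infer_instance

-- ===== CLAIM (what is proved, stated in full; the proofs are below) =====
def Claim_equal_clean_numeric : Prop := ∀ (text : String), Dom_clean_numeric text → Spec_clean_numeric text (clean_numeric text)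

-- ===== LEMMAS AND PROOFS =====

-- single-character replace is a pointwise map
theorem replace_go_single (k v : Char) :
    ∀ (fuel : Nat) (l acc : List Char), l.length ≤ fuel →
      PySem.Chars.replace.go [k] [v] fuel l acc
        = acc.reverse ++ l.map (fun c => if k == c then v else c) := by
  intro fuel
  induction fuel with
  | zero =>
    intro l acc h
    have : l = [] := List.length_eq_zero_iff.mp (Nat.le_zero.mp h)
    subst this
    simp [PySem.Chars.replace.go]
  | succ n ih =>
    intro l acc h
    cases l with
    | nil => simp [PySem.Chars.replace.go]
    | cons c t =>
      have ht : t.length ≤ n := Nat.le_of_succ_le_succ (by simpa using h)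
      by_cases hk : (k == c) = true
      · have hp : [k].isPrefixOf (c :: t) = true := by
          show (k == c && List.isPrefixOf [] t) = true
          simp [hk]
        simp only [PySem.Chars.replace.go, hp, if_pos]
        rw [show List.drop [k].length (c :: t) = t from rfl]
        rw [ih t _ ht]
        simp only [List.map_cons, if_pos hk]
        simp
      · have hk' : (k == c) = false := by simpa using hk
        have hp : [k].isPrefixOf (c :: t) = false := by
          show (k == c && List.isPrefixOf [] t) = false
          simp [hk']
        simp only [PySem.Chars.replace.go, hp, Bool.false_eq_true, if_false]
        rw [ih t _ ht]
        simp only [List.map_cons, if_neg hk]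
        simp

theorem replace_single (k v : Char) (l : List Char) :
    PySem.Chars.replace l [k] [v] = l.map (fun c => if k == c then v else c) := by
  have h := replace_go_single k v l.length l [] (le_refl _)
  simpa [PySem.Chars.replace] using h

-- the five pointwise substitutions composed equal a single lookup in pvSubMap
theorem chain_eq_lookup (c : Char) :
    (fun c => if ('B' : Char) == c then '8' else c)
      ((fun c => if ('S' : Char) == c then '5' else c)
        ((fun c => if ('l' : Char) == c then '1' else c)
          ((fun c => if ('I' : Char) == c then '1' else c)
            ((fun c => if ('O' : Char) == c then '0' else c) c))))
      = pvSubMap.getD c c := by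
  by_cases hO : c = 'O'; · subst hO; decide
  by_cases hI : c = 'I'; · subst hI; decide
  by_cases hl : c = 'l'; · subst hl; decide
  by_cases hS : c = 'S'; · subst hS; decide
  by_cases hB : c = 'B'; · subst hB; decide
  have hc : pvSubMap.contains c = false := by
    simp only [pvSubMap, PySem.Dict.contains_mk, List.any_cons, List.any_nil, Bool.or_false,
      Bool.or_eq_false_iff, beq_eq_false_iff_ne, ne_eq]
    exact ⟨fun h => hO h.symm, fun h => hI h.symm, fun h => hl h.symm,
           fun h => hS h.symm, fun h => hB h.symm⟩
  have gD : pvSubMap.getD c c = c := PySem.Dict.getD_of_not_contains _ _ hc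
  rw [gD]
  have e1 : (if ('O' : Char) == c then '0' else c) = c :=
    if_neg (fun h => hO (beq_iff_eq.mp h).symm)
  have e2 : (if ('I' : Char) == c then '1' else c) = c :=
    if_neg (fun h => hI (beq_iff_eq.mp h).symm)
  have e3 : (if ('l' : Char) == c then '1' else c) = c :=
    if_neg (fun h => hl (beq_iff_eq.mp h).symm)
  have e4 : (if ('S' : Char) == c then '5' else c) = c :=
    if_neg (fun h => hS (beq_iff_eq.mp h).symm)
  have e5 : (if ('B' : Char) == c then '8' else c) = c :=
    if_neg (fun h => hB (beq_iff_eq.mp h).symm)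
  simp only [e1, e2, e3, e4, e5]

-- ===== VERDICT (by name: the statement is the Claim_ definition above) =====
set_option maxHeartbeats 1000000 in
theorem clean_numeric_spec : Claim_equal_clean_numeric := by
  intro text _
  unfold Spec_clean_numeric clean_numeric clean_numeric_alt
  show PySem.Str.replace (PySem.Str.replace (PySem.Str.replace (PySem.Str.replace
        (PySem.Str.replace text "O" "0") "I" "1") "l" "1") "S" "5") "B" "8"
      = String.ofList (text.toList.map (fun c => pvSubMap.getD c c))
  simp only [PySem.Str.replace, String.toList_ofList,
    show ("O" : String).toList = ['O'] from rfl, show ("0" : String).toList = ['0'] from rfl,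
    show ("I" : String).toList = ['I'] from rfl, show ("1" : String).toList = ['1'] from rfl,
    show ("l" : String).toList = ['l'] from rfl, show ("S" : String).toList = ['S'] from rfl,
    show ("5" : String).toList = ['5'] from rfl, show ("B" : String).toList = ['B'] from rfl,
    show ("8" : String).toList = ['8'] from rfl]
  rw [replace_single, replace_single, replace_single, replace_single, replace_single]
  simp only [List.map_map]
  congr 1
  apply List.map_congr_left
  intro c _
  exact chain_eq_lookup c
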